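-- pv_equiv track=rewrite | github.com/1drturtle/cs4240 | assignments/2021/09/2021.09.23-lp0.py | maximum_product
-- ===== SOURCE A (Python) =====
-- from typing import List
--
-- def maximum_product(lists: List[List[int]]):
--     """prec: lists is a nonempty list of numerical lists.
--     Note that one of the numerical lists could be empty and
--     that the product of an empty list is 1.
--     postc:  returns THE LIST with the largest product.
--     In the event of a tie, it returns the first such list."""
--
--     out = []
--     for x in lists:
--         if len(x) == 0:  # empty list = 1
--             out.append(1)
--         else:
--             # can be replaced with itertools.product
--             a = 1
--             for i in x:
--                 a *= i
--             out.append(a)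
--
--     index = out.index(max(out))  # out has the same amount of elements so we can do a 1:1 index map
--     return lists[index]
-- ===== SOURCE B (Python) =====
-- def maximum_product(lists):
--     best_list = None
--     best_product = None
--     for x in lists:
--         p = 1
--         for i in x:
--             p *= i
--         if best_product is None or p > best_product:
--             best_product = p
--             best_list = x
--     return best_list
-- ===== Notes on version B (the rewrite author's own statement) =====
-- stated objective: simpler
-- what changed: Fuses product computation and winner selection into one pass with a running best (strict > keeps the first maximal sublist), instead of building a products list, taking max, and mapping its index back.
import Mathlib
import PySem

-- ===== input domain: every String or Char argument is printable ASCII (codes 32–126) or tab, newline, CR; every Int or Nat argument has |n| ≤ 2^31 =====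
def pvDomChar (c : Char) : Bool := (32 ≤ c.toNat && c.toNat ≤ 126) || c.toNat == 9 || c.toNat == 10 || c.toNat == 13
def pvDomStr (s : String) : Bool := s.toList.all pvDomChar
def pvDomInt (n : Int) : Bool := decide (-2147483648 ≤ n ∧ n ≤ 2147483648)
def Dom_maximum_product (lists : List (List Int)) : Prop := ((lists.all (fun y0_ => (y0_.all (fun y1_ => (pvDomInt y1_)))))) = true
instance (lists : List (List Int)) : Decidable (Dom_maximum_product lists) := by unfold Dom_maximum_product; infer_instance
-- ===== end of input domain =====

-- B fuses product computation and first-winner selection into a single pass with a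
-- running best (strict '>' with a None sentinel keeps the first maximal sublist),
-- instead of A's products list + max + index; same O(total) cost, simpler structure.

-- ===== PORT A =====
-- out = []; for x in lists: append 1 if x empty else the hand-rolled product
def maximum_product (lists : List (List Int)) : List Int :=
  let out : List Int := lists.foldl
    (fun out x =>
      if x.length = 0 then out ++ [1]
      else out ++ [x.foldl (fun a i => a * i) 1]) []
  -- index = out.index(max(out)); return lists[index]
  match PySem.List.max? out (fun y => y) with
  | none => []        -- unreachable under Pre_: max([]) raises ValueError
  | some m =>
    match PySem.List.index? out m with
    | none => []      -- unreachable: max is a member of out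
    | some index => (PySem.List.pyGet? lists (index : Int)).getD []

-- ===== PORT B =====
-- single pass: best = none; for x: p = product x; replace best iff none or p > best
def maximum_product_alt (lists : List (List Int)) : List Int :=
  let best : Option (List Int × Int) := lists.foldl
    (fun best x =>
      let p := x.foldl (fun a i => a * i) 1
      match best with
      | none => some (x, p)
      | some (bl, bp) => if p > bp then some (x, p) else some (bl, bp)) none
  match best with
  | none => []        -- lists = []: Python B returns None (outside Pre_)
  | some (bl, _) => bl

-- ===== PRECONDITION & SPEC =====
-- Pre_ excludes exactly the empty input, on which A raises ValueError (max of empty sequence).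
def Pre_maximum_product (lists : List (List Int)) : Prop := lists ≠ []
instance (lists : List (List Int)) : Decidable (Pre_maximum_product lists) := by
  unfold Pre_maximum_product; infer_instance

def pvWitness_maximum_product : List (List Int) := [[2, 3], [], [7]]

def Spec_maximum_product (lists : List (List Int)) (out : List Int) : Prop := out = maximum_product_alt lists
instance (lists : List (List Int)) (out : List Int) : Decidable (Spec_maximum_product lists out) := by unfold Spec_maximum_product; infer_instance

-- ===== CLAIM (what is proved, stated in full; the proofs are below) =====
def Claim_equal_maximum_product : Prop := ∀ (lists : List (List Int)), Dom_maximum_product lists → Pre_maximum_product lists → Spec_maximum_product lists (maximum_product lists)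

-- ===== LEMMAS AND PROOFS =====

def pvProd (x : List Int) : Int := x.foldl (fun a i => a * i) 1

-- running-best recursion (the body of B's fold, in direct style)
def pvGo (s : List Int × Int) : List (List Int) → List Int × Int
  | [] => s
  | y :: rest => if pvProd y > s.2 then pvGo (y, pvProd y) rest else pvGo s rest

-- first pair whose value weakly dominates every later value = first global max
def pvAm : List (List Int × Int) → List Int
  | [] => []
  | p :: rest => if ∀ q ∈ rest, q.2 ≤ p.2 then p.1 else pvAm rest

lemma pv_foldl_max_absorb (l : List Int) (a b : Int) :
    l.foldl max (max a b) = max a (l.foldl max b) := by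
  induction l generalizing b with
  | nil => rfl
  | cons x t ih => simp only [List.foldl_cons, max_assoc]; exact ih (max b x)

lemma pv_foldl_max_le_iff (l : List Int) (a c : Int) :
    l.foldl max a ≤ c ↔ a ≤ c ∧ ∀ x ∈ l, x ≤ c := by
  induction l generalizing a with
  | nil => simp
  | cons x t ih =>
    rw [List.foldl_cons, ih, max_le_iff, and_assoc, List.forall_mem_cons]

lemma pv_le_foldl_max (l : List Int) (a : Int) : a ≤ l.foldl max a :=
  ((pv_foldl_max_le_iff l a _).mp le_rfl).1

-- B's fold over rest from an established best is pvGo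
lemma pv_foldl_go (rest : List (List Int)) (s : List Int × Int) :
    rest.foldl
      (fun best x =>
        let p := x.foldl (fun a i => a * i) 1
        match best with
        | none => some (x, p)
        | some (bl, bp) => if p > bp then some (x, p) else some (bl, bp))
      (some s) = some (pvGo s rest) := by
  induction rest generalizing s with
  | nil => rfl
  | cons y t ih =>
    obtain ⟨bl, bp⟩ := s
    by_cases h : pvProd y > bp
    · rw [pvGo, if_pos h]
      have h' : bp < List.foldl (fun a i => a * i) 1 y := h
      simp only [List.foldl_cons, if_pos h']
      exact ih (y, pvProd y)
    · rw [pvGo, if_neg h]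
      have h' : ¬ bp < List.foldl (fun a i => a * i) 1 y := h
      simp only [List.foldl_cons, if_neg h']
      exact ih (bl, bp)

-- pvGo is argmax-first over the (element, product) pairs
lemma pv_go_am (rest : List (List Int)) (s : List Int × Int) :
    (pvGo s rest).1 = pvAm ((s.1, s.2) :: rest.map (fun z => (z, pvProd z))) := by
  induction rest generalizing s with
  | nil => simp [pvGo, pvAm]
  | cons y t ih =>
    rw [pvGo, List.map_cons]
    by_cases h : pvProd y > s.2
    · rw [if_pos h, ih (y, pvProd y)]
      conv_rhs => rw [pvAm]
      rw [if_neg]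
      intro hall
      exact absurd (hall (y, pvProd y) (by simp)) (not_le.mpr h)
    · rw [if_neg h, ih s]
      conv_lhs => rw [pvAm]
      conv_rhs => rw [pvAm]
      by_cases hall : ∀ q ∈ (y, pvProd y) :: t.map (fun z => (z, pvProd z)), q.2 ≤ s.2
      · rw [if_pos hall, if_pos]
        intro q hq; exact hall q (List.mem_cons_of_mem _ hq)
      · rw [if_neg hall, if_neg, pvAm, if_neg]
        · intro hall2
          apply hall
          intro q hq
          rcases List.mem_cons.mp hq with rfl | hq
          · exact not_lt.mp h
          · exact le_trans (hall2 q hq) (not_lt.mp h)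
        · intro hall2
          apply hall
          intro q hq
          rcases List.mem_cons.mp hq with rfl | hq
          · exact not_lt.mp h
          · exact hall2 q hq

-- A's out accumulation is acc ++ products
lemma pv_out_eq (l : List (List Int)) (acc : List Int) :
    l.foldl
      (fun out x =>
        if x.length = 0 then out ++ [1]
        else out ++ [x.foldl (fun a i => a * i) 1]) acc = acc ++ l.map pvProd := by
  induction l generalizing acc with
  | nil => simp
  | cons x t ih =>
    simp only [List.foldl_cons, List.map_cons]
    have hx : (if x.length = 0 then acc ++ [1] else acc ++ [x.foldl (fun a i => a * i) 1])
        = acc ++ [pvProd x] := by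
      by_cases h : x.length = 0
      · have : x = [] := List.length_eq_zero_iff.mp h
        subst this; simp [pvProd]
      · simp [h, pvProd]
    rw [hx, ih]
    simp

-- A's max+index+get over a nonempty pair list lands on pvAm
lemma pv_idx_am (ps : List (List Int × Int)) (p : List Int × Int) :
    ∃ i, PySem.List.index? ((p :: ps).map Prod.snd) ((ps.map Prod.snd).foldl max p.2) = some i ∧
      ((p :: ps).map Prod.fst)[i]? = some (pvAm (p :: ps)) := by
  induction ps generalizing p with
  | nil =>
    refine ⟨0, ?_, ?_⟩
    · simp [PySem.List.index?_eq_idxOf?, List.idxOf?]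
    · simp [pvAm]
  | cons q t ih =>
    by_cases hmax : ∀ r ∈ q :: t, r.2 ≤ p.2
    · have hM : ((q :: t).map Prod.snd).foldl max p.2 = p.2 := by
        apply le_antisymm
        · rw [pv_foldl_max_le_iff]
          refine ⟨le_rfl, fun x hx => ?_⟩
          rcases List.mem_map.mp hx with ⟨r, hr, rfl⟩; exact hmax r hr
        · exact pv_le_foldl_max _ _
      refine ⟨0, ?_, ?_⟩
      · rw [hM, List.map_cons, PySem.List.index?_cons_self]
      · rw [pvAm, if_pos hmax]; simp
    · -- the maximum lies strictly in the tail
      simp only [not_forall, not_le] at hmax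
      obtain ⟨r, hr, hrgt⟩ := hmax
      have hF := (pv_foldl_max_le_iff (t.map Prod.snd) q.2 _).mp le_rfl
      have hpM' : p.2 < (t.map Prod.snd).foldl max q.2 := by
        rcases List.mem_cons.mp hr with rfl | hr
        · exact lt_of_lt_of_le hrgt hF.1
        · exact lt_of_lt_of_le hrgt (hF.2 r.2 (List.mem_map.mpr ⟨r, hr, rfl⟩))
      have hM : ((q :: t).map Prod.snd).foldl max p.2
          = (t.map Prod.snd).foldl max q.2 := by
        rw [List.map_cons, List.foldl_cons, pv_foldl_max_absorb]
        exact max_eq_right (le_of_lt hpM')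
      obtain ⟨i, hidx, hget⟩ := ih q
      refine ⟨i + 1, ?_, ?_⟩
      · rw [List.map_cons, hM, PySem.List.index?_cons_of_ne _ (ne_of_lt hpM'), hidx]
        rfl
      · rw [List.map_cons, List.getElem?_cons_succ, hget]
        have hne : ¬ ∀ s ∈ q :: t, s.2 ≤ p.2 := fun hc => absurd (hc r hr) (not_le.mpr hrgt)
        conv_rhs => rw [pvAm, if_neg hne]

-- ===== VERDICT (by name: the statement is the Claim_ definition above) =====
theorem maximum_product_spec : Claim_equal_maximum_product := by
  intro lists _ hpre
  unfold Spec_maximum_product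
  cases lists with
  | nil => exact absurd rfl hpre
  | cons x rest =>
    obtain ⟨i, hidx, hget⟩ := pv_idx_am (rest.map (fun z => (z, pvProd z))) (x, pvProd x)
    rw [List.map_cons, List.map_map] at hidx
    have hsnd : (Prod.snd ∘ fun z => (z, pvProd z)) = pvProd := rfl
    rw [hsnd] at hidx
    replace hidx : PySem.List.index? (pvProd x :: rest.map pvProd)
        (List.foldl max (pvProd x) (rest.map pvProd)) = some i := hidx
    rw [List.map_cons, List.map_map] at hget
    have hfst : (Prod.fst ∘ fun z => (z, pvProd z)) = id := rfl
    rw [hfst, List.map_id] at hget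
    replace hget : (x :: rest)[i]? =
        some (pvAm ((x, pvProd x) :: rest.map (fun z => (z, pvProd z)))) := hget
    -- A side
    have hA : maximum_product (x :: rest)
        = pvAm ((x, pvProd x) :: rest.map (fun z => (z, pvProd z))) := by
      simp only [maximum_product]
      rw [pv_out_eq, List.nil_append, List.map_cons, PySem.List.max?_id_cons]
      simp only [hidx, PySem.List.pyGet?_natCast, hget, Option.getD_some]
    -- B side
    have hB : maximum_product_alt (x :: rest)
        = pvAm ((x, pvProd x) :: rest.map (fun z => (z, pvProd z))) := by
      simp only [maximum_product_alt, List.foldl_cons]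
      rw [pv_foldl_go]
      exact pv_go_am rest (x, pvProd x)
    rw [hA, hB]
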